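-- pv_equiv track=rewrite | github.com/erenersarac10/legalnewest | backend/api/middleware/compression.py | should_compress
-- ===== SOURCE A (Python) =====
-- COMPRESSIBLE_TYPES = {
--     "application/json",
--     "application/javascript",
--     "application/xml",
--     "text/html",
--     "text/css",
--     "text/plain",
--     "text/xml",
--     "text/csv",
--     "text/markdown",
--     "application/x-ndjson",
-- }
--
-- NON_COMPRESSIBLE_TYPES = {
--     "image/jpeg",
--     "image/jpg",
--     "image/png",
--     "image/gif",
--     "image/webp",
--     "video/*",
--     "audio/*",
--     "application/zip",
--     "application/gzip",
--     "application/x-gzip",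
--     "application/octet-stream",
-- }
--
-- def should_compress(content_type: str) -> bool:
--     """
--     Check if content type should be compressed.
--
--     Args:
--         content_type: Content-Type header value
--
--     Returns:
--         True if should compress
--     """
--     # Extract base type (remove charset, etc.)
--     base_type = content_type.split(";")[0].strip().lower()
--
--     # Check if explicitly compressible
--     if base_type in COMPRESSIBLE_TYPES:
--         return True
--
--     # Check if explicitly non-compressible
--     for non_comp in NON_COMPRESSIBLE_TYPES:
--         if non_comp.endswith("*"):
--             # Wildcard match (e.g., video/*)
--             prefix = non_comp[:-1]
--             if base_type.startswith(prefix):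
--                 return False
--         elif base_type == non_comp:
--             return False
--
--     # Default: compress text/* types
--     return base_type.startswith("text/")
-- ===== SOURCE B (Python) =====
-- COMPRESSIBLE_TYPES = {
--     "application/json",
--     "application/javascript",
--     "application/xml",
--     "text/html",
--     "text/css",
--     "text/plain",
--     "text/xml",
--     "text/csv",
--     "text/markdown",
--     "application/x-ndjson",
-- }
--
-- def should_compress(content_type: str) -> bool:
--     """Compress exactly the explicitly compressible types and any text/* type."""
--     base_type = content_type.split(";")[0].strip().lower()
--     return base_type in COMPRESSIBLE_TYPES or base_type.startswith("text/")
-- ===== Notes on version B (the rewrite author's own statement) =====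
-- stated objective: simpler
-- what changed: B drops A's NON_COMPRESSIBLE_TYPES loop (with its wildcard/exact-match branches) entirely and returns the single expression `base in COMPRESSIBLE_TYPES or base.startswith('text/')`, which is equivalent because every non-compressible entry only matches non-text bases that would fall through to False anyway.
import Mathlib
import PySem

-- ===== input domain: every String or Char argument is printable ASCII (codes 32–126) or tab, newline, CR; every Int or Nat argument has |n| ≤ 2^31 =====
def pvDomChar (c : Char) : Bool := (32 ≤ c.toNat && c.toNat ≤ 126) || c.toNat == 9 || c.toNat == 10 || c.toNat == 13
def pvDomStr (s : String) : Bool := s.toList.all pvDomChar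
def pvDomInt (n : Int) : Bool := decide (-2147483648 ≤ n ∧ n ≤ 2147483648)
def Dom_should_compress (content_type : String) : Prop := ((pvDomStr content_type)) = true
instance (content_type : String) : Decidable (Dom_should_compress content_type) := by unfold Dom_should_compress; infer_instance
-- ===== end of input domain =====

-- B replaces A's explicit NON_COMPRESSIBLE blacklist loop by the single expression
-- `base in COMPRESSIBLE or base.startswith("text/")` (the blacklist is provably inert); objective: simpler.

-- ===== PORT A =====
def compressibleTypes : List String :=
  ["application/json", "application/javascript", "application/xml", "text/html",
   "text/css", "text/plain", "text/xml", "text/csv", "text/markdown", "application/x-ndjson"]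

def nonCompressibleTypes : List String :=
  ["image/jpeg", "image/jpg", "image/png", "image/gif", "image/webp",
   "video/*", "audio/*", "application/zip", "application/gzip",
   "application/x-gzip", "application/octet-stream"]

-- the `for non_comp in NON_COMPRESSIBLE_TYPES` loop, falling through to the final return
def nonCompLoop (base : String) : List String → Bool
  | [] => PySem.Str.startswith base "text/"
  | nc :: rest =>
    if PySem.Str.endswith nc "*" then
      if PySem.Str.startswith base (PySem.Str.slice nc none (some (-1))) then false
      else nonCompLoop base rest
    else if base == nc then false
    else nonCompLoop base rest

def should_compress (content_type : String) : Bool :=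
  -- content_type.split(";")[0]: split on a nonempty separator is never empty, so [0] never raises
  let base := PySem.Str.lower (PySem.Str.strip ((((PySem.Str.split? content_type ";").getD []).headD "")))
  if compressibleTypes.contains base then true
  else nonCompLoop base nonCompressibleTypes

-- ===== PORT B =====
def should_compress_alt (content_type : String) : Bool :=
  let base := PySem.Str.lower (PySem.Str.strip ((((PySem.Str.split? content_type ";").getD []).headD "")))
  compressibleTypes.contains base || PySem.Str.startswith base "text/"

-- ===== PRECONDITION & SPEC =====
def Spec_should_compress (content_type : String) (out : Bool) : Prop := out = should_compress_alt content_type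
instance (content_type : String) (out : Bool) : Decidable (Spec_should_compress content_type out) := by unfold Spec_should_compress; infer_instance

-- ===== CLAIM (what is proved, stated in full; the proofs are below) =====
def Claim_equal_should_compress : Prop := ∀ (content_type : String), Dom_should_compress content_type → Spec_should_compress content_type (should_compress content_type)

-- ===== LEMMAS AND PROOFS =====

-- two nonempty prefixes of the same string start with the same character
lemma prefix_head_clash {a b : Char} {l1 l2 L : List Char}
    (h1 : a :: l1 <+: L) (h2 : b :: l2 <+: L) : a = b := by
  cases L with
  | nil => exact absurd (List.eq_nil_of_prefix_nil h1) (by simp)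
  | cons c cs =>
    rw [List.cons_prefix_cons] at h1 h2
    exact h1.1.trans h2.1.symm

lemma startswith_clash (base : String) (p q : String) (c d : Char) (ps qs : List Char)
    (hp : p.toList = c :: ps) (hq : q.toList = d :: qs) (hne : c ≠ d)
    (h : PySem.Str.startswith base p = true) : PySem.Str.startswith base q = false := by
  cases hsw : PySem.Str.startswith base q with
  | false => rfl
  | true =>
    exfalso
    simp only [PySem.Str.startswith_eq, PySem.Chars.startswith_iff, hp, hq] at h hsw
    exact hne (prefix_head_clash h hsw)

set_option maxHeartbeats 1000000 in
lemma nonCompLoop_inert (base : String) :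
    nonCompLoop base nonCompressibleTypes = PySem.Str.startswith base "text/" := by
  have sv : PySem.Str.slice "video/*" none (some (-1)) = "video/" := by decide
  have sa : PySem.Str.slice "audio/*" none (some (-1)) = "audio/" := by decide
  simp only [nonCompressibleTypes, nonCompLoop, sv, sa,
    show PySem.Str.endswith "image/jpeg" "*" = false by decide,
    show PySem.Str.endswith "image/jpg" "*" = false by decide,
    show PySem.Str.endswith "image/png" "*" = false by decide,
    show PySem.Str.endswith "image/gif" "*" = false by decide,
    show PySem.Str.endswith "image/webp" "*" = false by decide,
    show PySem.Str.endswith "video/*" "*" = true by decide,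
    show PySem.Str.endswith "audio/*" "*" = true by decide,
    show PySem.Str.endswith "application/zip" "*" = false by decide,
    show PySem.Str.endswith "application/gzip" "*" = false by decide,
    show PySem.Str.endswith "application/x-gzip" "*" = false by decide,
    show PySem.Str.endswith "application/octet-stream" "*" = false by decide,
    Bool.false_eq_true, if_false, if_true]
  split_ifs with h1 h2 h3 h4 h5 h6 h7 h8 h9 h10 h11
  · rw [beq_iff_eq] at h1; subst h1; decide
  · rw [beq_iff_eq] at h2; subst h2; decide
  · rw [beq_iff_eq] at h3; subst h3; decide
  · rw [beq_iff_eq] at h4; subst h4; decide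
  · rw [beq_iff_eq] at h5; subst h5; decide
  · exact (startswith_clash base "video/" "text/" 'v' 't' _ _ rfl rfl (by decide) h6).symm
  · exact (startswith_clash base "audio/" "text/" 'a' 't' _ _ rfl rfl (by decide) h7).symm
  · rw [beq_iff_eq] at h8; subst h8; decide
  · rw [beq_iff_eq] at h9; subst h9; decide
  · rw [beq_iff_eq] at h10; subst h10; decide
  · rw [beq_iff_eq] at h11; subst h11; decide
  · rfl

-- ===== VERDICT (by name: the statement is the Claim_ definition above) =====
theorem should_compress_spec : Claim_equal_should_compress := by
  intro ct _
  unfold Spec_should_compress should_compress should_compress_alt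
  simp [nonCompLoop_inert]
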